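-- pv_equiv track=rewrite | github.com/ciuffyg/comp110-21f-workspace | exercises/ex06/dictionaries.py | count
-- ===== SOURCE A (Python) =====
-- def count(xs: list[str]) -> dict[str, int]:
--     """Returns a dictionary with the str values from a given lsit as keys and their corresponding values as their frequency in the list."""
--     count_dict: dict[str, int] = {}
--     i: int = 0
--     while i < len(xs):
--         if xs[i] in count_dict:
--             count_dict[xs[i]] += 1
--         else:
--             count_dict[xs[i]] = 1
--         i += 1
--     return count_dict
-- ===== SOURCE B (Python) =====
-- def count(xs: list[str]) -> dict[str, int]:
--     """Returns a dictionary with the str values from a given lsit as keys and their corresponding values as their frequency in the list."""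
--     return {x: xs.count(x) for x in dict.fromkeys(xs)}
-- ===== Notes on version B (the rewrite author's own statement) =====
-- stated objective: simpler
-- what changed: Replaces the index-driven while loop that increments a per-element counter dict with a dedupe-then-count dict comprehension: build the distinct keys once with dict.fromkeys, then count each distinct key with one xs.count pass.
import Mathlib
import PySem

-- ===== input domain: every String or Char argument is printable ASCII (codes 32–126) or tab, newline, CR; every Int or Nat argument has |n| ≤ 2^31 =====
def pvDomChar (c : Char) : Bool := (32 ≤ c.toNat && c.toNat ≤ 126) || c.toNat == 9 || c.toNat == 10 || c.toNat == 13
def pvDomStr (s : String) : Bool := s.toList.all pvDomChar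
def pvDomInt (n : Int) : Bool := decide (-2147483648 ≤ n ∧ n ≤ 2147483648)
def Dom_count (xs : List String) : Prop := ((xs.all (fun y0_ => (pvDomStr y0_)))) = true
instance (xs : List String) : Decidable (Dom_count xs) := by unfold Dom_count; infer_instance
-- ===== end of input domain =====

-- ===== PORT A =====
-- while i < len(xs): increment count_dict[xs[i]] (insert 1 on first sight); return the dict's items
def count (xs : List String) : List (String × Int) :=
  ((PySem.List.pyRange 0 (xs.length : Int) 1).foldl
    (fun d i =>
      let x := PySem.List.pyGetD xs i ""
      if d.contains x then d.insert x (d.getD x 0 + 1) else d.insert x 1)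
    (PySem.Dict.empty : PySem.Dict String Int)).items

-- ===== PORT B =====
-- {x: xs.count(x) for x in dict.fromkeys(xs)}
def count_alt (xs : List String) : List (String × Int) :=
  (PySem.List.dedup xs).map (fun k => (k, (xs.count k : Int)))

-- ===== PRECONDITION & SPEC =====
def Spec_count (xs : List String) (out : List (String × Int)) : Prop := out = count_alt xs
instance (xs : List String) (out : List (String × Int)) : Decidable (Spec_count xs out) := by unfold Spec_count; infer_instance

-- ===== CLAIM (what is proved, stated in full; the proofs are below) =====
def Claim_equal_count : Prop := ∀ (xs : List String), Dom_count xs → Spec_count xs (count xs)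

-- ===== LEMMAS AND PROOFS =====
-- A's branch is exactly the insert-getD+1 counter step (on a missing key getD gives 0).
theorem count_step_eq (d : PySem.Dict String Int) (x : String) :
    (if d.contains x then d.insert x (d.getD x 0 + 1) else d.insert x 1)
      = d.insert x (d.getD x 0 + 1) := by
  by_cases h : d.contains x = true
  · simp [h]
  · simp only [Bool.not_eq_true] at h
    simp [h, PySem.Dict.getD_of_not_contains d (0 : Int) h]

-- ===== VERDICT (by name: the statement is the Claim_ definition above) =====
theorem count_spec : Claim_equal_count := by
  intro xs _
  unfold Spec_count count count_alt
  rw [PySem.List.foldl_pyRange_zero_pyGetD' xs ""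
      (fun d x => if d.contains x then d.insert x (d.getD x 0 + 1) else d.insert x 1)
      (PySem.Dict.empty : PySem.Dict String Int)]
  have hcongr : xs.foldl
      (fun d x => if d.contains x then d.insert x (d.getD x 0 + 1) else d.insert x 1)
      (PySem.Dict.empty : PySem.Dict String Int)
      = xs.foldl (fun d x => d.insert x (d.getD x 0 + 1)) PySem.Dict.empty := by
    congr 1
    funext d x
    exact count_step_eq d x
  rw [hcongr, PySem.Dict.foldl_insert_getD_add_one_eq_counter,
      PySem.Dict.items_counter]
  simp
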